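-- pv_equiv track=rewrite | github.com/muoten/chromaprint2vec | chromaprint2chromagram.py | decode_subfingerprint
-- ===== SOURCE A (Python) =====
-- def gray_to_binary(gray):
--     """
--     Convert a Gray code number to its binary equivalent.
--
--     :param gray: Gray code (integer)
--     :return: Original binary number (integer)
--     """
--     binary = gray
--     while gray > 0:
--         gray >>= 1
--         binary ^= gray
--     return binary
--
-- def decode_subfingerprint(bits, num_classifiers):
--     """
--     Decode the 32-bit subfingerprint back to the original classifications.
--
--     :param bits: 32-bit integer representing the subfingerprint
--     :param num_classifiers: Number of classifiers used (determines bit extraction)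
--     :return: List of original classification values
--     """
--     classifications = []
--     for _ in range(num_classifiers):
--         # Extract the last 2 bits
--         gray_code = bits & 0b11
--         # Decode the Gray code to the original classification
--         classification = gray_to_binary(gray_code)
--         classifications.insert(0, classification)  # Insert at the beginning to maintain order
--         # Shift bits to process the next 2-bit chunk
--         bits >>= 2
--     return classifications
-- ===== SOURCE B (Python) =====
-- def decode_subfingerprint(bits, num_classifiers):
--     """
--     Decode the subfingerprint back to the original classifications, reading the
--     2-bit chunks from most significant to least significant instead of consuming
--     a mutable shift register, and gray-decoding each chunk in closed form.
--     """
--     chunks = [(bits >> shift) & 0b11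
--               for shift in range(2 * num_classifiers - 2, -1, -2)]
--     return [(g >> 1) ^ g for g in chunks]
-- ===== Notes on version B (the rewrite author's own statement) =====
-- stated objective: faster
-- what changed: B computes each 2-bit chunk directly from the immutable input with a per-index shift, appending MSB-first (no insert(0) shift-register loop), and gray-decodes in closed form g ^ (g >> 1) instead of A's while loop.
import Mathlib
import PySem

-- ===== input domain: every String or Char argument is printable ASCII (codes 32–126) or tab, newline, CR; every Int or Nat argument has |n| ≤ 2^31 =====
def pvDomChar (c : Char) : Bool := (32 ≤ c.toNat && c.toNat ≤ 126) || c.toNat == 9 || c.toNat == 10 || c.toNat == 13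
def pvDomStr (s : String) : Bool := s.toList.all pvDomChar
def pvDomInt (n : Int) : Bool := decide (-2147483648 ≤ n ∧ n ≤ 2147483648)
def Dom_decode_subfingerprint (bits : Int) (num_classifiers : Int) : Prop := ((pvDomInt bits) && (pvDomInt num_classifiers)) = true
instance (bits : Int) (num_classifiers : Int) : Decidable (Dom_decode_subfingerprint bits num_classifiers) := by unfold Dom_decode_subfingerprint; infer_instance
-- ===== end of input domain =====

-- B reads the 2-bit chunks MSB-first off the immutable input with per-index shifts and a
-- closed-form gray decode, instead of A's mutable shift register with insert(0) and
-- while-loop gray decoder; return-value equivalence, no argument is mutated.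

-- ===== PORT A =====
-- while gray > 0: gray >>= 1; binary ^= gray
def grayToBinaryLoop (binary : Int) (gray : Int) : Int :=
  if h : 0 < gray then
    grayToBinaryLoop (PySem.Int.bxor binary (gray >>> (1:Nat))) (gray >>> (1:Nat))
  else binary
termination_by gray.toNat
decreasing_by
  have h1 : gray >>> (1:Nat) = gray / 2 := by
    rw [Int.shiftRight_eq_div_pow]; norm_num
  omega

def gray_to_binary (gray : Int) : Int := grayToBinaryLoop gray gray

def decode_subfingerprint (bits : Int) (num_classifiers : Int) : List Int :=
  ((PySem.List.pyRange 0 num_classifiers 1).foldl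
    (fun (st : List Int × Int) _ =>
      let gray_code := PySem.Int.band st.2 3
      let classification := gray_to_binary gray_code
      (classification :: st.1, st.2 >>> (2:Nat)))
    ([], bits)).1

-- ===== PORT B =====
def decode_subfingerprint_alt (bits : Int) (num_classifiers : Int) : List Int :=
  let chunks : List Int := (PySem.List.pyRange (2 * num_classifiers - 2) (-1) (-2)).map
    (fun shift => PySem.Int.band (bits >>> shift.toNat) 3)
  chunks.map (fun (g : Int) => PySem.Int.bxor (g >>> (1:Nat)) g)

-- ===== PRECONDITION & SPEC =====
def Spec_decode_subfingerprint (bits : Int) (num_classifiers : Int) (out : List Int) : Prop := out = decode_subfingerprint_alt bits num_classifiers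
instance (bits : Int) (num_classifiers : Int) (out : List Int) : Decidable (Spec_decode_subfingerprint bits num_classifiers out) := by unfold Spec_decode_subfingerprint; infer_instance

-- ===== CLAIM (what is proved, stated in full; the proofs are below) =====
def Claim_equal_decode_subfingerprint : Prop := ∀ (bits : Int) (num_classifiers : Int), Dom_decode_subfingerprint bits num_classifiers → Spec_decode_subfingerprint bits num_classifiers (decode_subfingerprint bits num_classifiers)

-- ===== LEMMAS AND PROOFS =====

-- common spine: the decoded 2-bit chunks, most shifted first
def pvChunks (bits : Int) : Nat → List Int
  | 0 => []
  | n + 1 => PySem.Int.bxor ((PySem.Int.band (bits >>> (2 * n)) 3) >>> (1:Nat))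
               (PySem.Int.band (bits >>> (2 * n)) 3) :: pvChunks bits n

lemma band3_bounds (b : Int) : 0 ≤ PySem.Int.band b 3 ∧ PySem.Int.band b 3 < 4 := by
  unfold PySem.Int.band
  split_ifs with h1 h2 h2 <;> simp_all
  · have := Nat.and_le_right (n := b.toNat) (m := 3); omega
  · have := Nat.sub_le 3 (3 &&& (-b - 1).toNat)
    have h3 : ((3:Int)).toNat = 3 := rfl
    omega

lemma gTBL_step (b g : Int) (h : 0 < g) :
    grayToBinaryLoop b g
      = grayToBinaryLoop (PySem.Int.bxor b (g >>> (1:Nat))) (g >>> (1:Nat)) := by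
  rw [grayToBinaryLoop]; simp [h]

lemma gTBL_base (b g : Int) (h : ¬ 0 < g) : grayToBinaryLoop b g = b := by
  rw [grayToBinaryLoop]; simp [h]

lemma gray_decode_eq (b : Int) :
    gray_to_binary (PySem.Int.band b 3)
      = PySem.Int.bxor ((PySem.Int.band b 3) >>> (1:Nat)) (PySem.Int.band b 3) := by
  obtain ⟨h1, h2⟩ := band3_bounds b
  unfold gray_to_binary
  interval_cases h : (PySem.Int.band b 3)
  · rw [gTBL_base _ _ (by norm_num)]; decide
  · rw [gTBL_step _ _ (by norm_num)]
    show grayToBinaryLoop 1 0 = _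
    rw [gTBL_base _ _ (by norm_num)]; decide
  · rw [gTBL_step _ _ (by norm_num)]
    show grayToBinaryLoop 3 1 = _
    rw [gTBL_step _ _ (by norm_num)]
    show grayToBinaryLoop 3 0 = _
    rw [gTBL_base _ _ (by norm_num)]; decide
  · rw [gTBL_step _ _ (by norm_num)]
    show grayToBinaryLoop 2 1 = _
    rw [gTBL_step _ _ (by norm_num)]
    show grayToBinaryLoop 2 0 = _
    rw [gTBL_base _ _ (by norm_num)]; decide

lemma loopA_eq (m : Nat) (acc : List Int) (cur : Int) :
    (List.range m).foldl
      (fun (st : List Int × Int) _ =>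
        (gray_to_binary (PySem.Int.band st.2 3) :: st.1, st.2 >>> (2:Nat)))
      (acc, cur)
    = (pvChunks cur m ++ acc, cur >>> (2 * m)) := by
  induction m generalizing acc cur with
  | zero => simp [pvChunks]
  | succ n ih =>
    rw [List.range_succ, List.foldl_append, ih]
    simp only [List.foldl_cons, List.foldl_nil, pvChunks, Prod.mk.injEq]
    refine ⟨by simp [gray_decode_eq], ?_⟩
    have h2 : 2 * (n + 1) = 2 * n + 2 := by ring
    rw [h2, Int.shiftRight_add]

lemma portA_eq (bits : Int) (n : Int) :
    decode_subfingerprint bits n = pvChunks bits n.toNat := by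
  unfold decode_subfingerprint
  rw [PySem.List.pyRange_one]
  simp only [Int.sub_zero]
  rw [List.foldl_map, loopA_eq]
  simp

lemma pyRange_neg2_nil (a : Int) (h : a ≤ -1) :
    PySem.List.pyRange a (-1) (-2) = [] := by
  unfold PySem.List.pyRange
  rw [if_neg (by norm_num), if_neg (by norm_num), if_neg (by omega)]
  simp

lemma pyRange_neg2_map (a : Int) (h : -1 < a) :
    PySem.List.pyRange a (-1) (-2)
      = (List.range ((a + 2) / 2).toNat).map (fun k : Nat => a + -2 * (k : Int)) := by
  unfold PySem.List.pyRange
  rw [if_neg (by norm_num), if_neg (by norm_num), if_pos h]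
  have hc : (a - -1 + - -2 - 1) / - -2 = (a + 2) / 2 := by norm_num; ring_nf
  rw [hc]

lemma pyRange_neg2_cons (a : Int) (h : -1 < a) :
    PySem.List.pyRange a (-1) (-2) = a :: PySem.List.pyRange (a - 2) (-1) (-2) := by
  rw [pyRange_neg2_map a h]
  by_cases h2 : (-1:Int) < a - 2
  · rw [pyRange_neg2_map (a - 2) h2]
    have hc1 : ((a + 2) / 2).toNat = ((a - 2 + 2) / 2).toNat + 1 := by omega
    rw [hc1, List.range_succ_eq_map]
    simp only [List.map_cons, List.map_map, Nat.cast_zero, mul_zero, add_zero]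
    refine congrArg (a :: ·) (List.map_congr_left ?_)
    intro k _
    simp only [Function.comp]
    push_cast
    ring
  · rw [pyRange_neg2_nil (a - 2) (by omega)]
    have hc1 : ((a + 2) / 2).toNat = 1 := by omega
    rw [hc1]
    simp

lemma portB_eq (bits : Int) (n : Int) :
    decode_subfingerprint_alt bits n = pvChunks bits n.toNat := by
  unfold decode_subfingerprint_alt
  simp only [List.map_map]
  obtain ⟨m, hm⟩ : ∃ m : Nat, n.toNat = m := ⟨n.toNat, rfl⟩
  rw [hm]
  induction m generalizing n with
  | zero =>
    rw [pyRange_neg2_nil (2 * n - 2) (by omega)]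
    simp [pvChunks]
  | succ k ih =>
    rw [pyRange_neg2_cons (2 * n - 2) (by omega)]
    simp only [List.map_cons, pvChunks, Function.comp]
    refine congrArg₂ (· :: ·) ?_ ?_
    · have ht : (2 * n - 2).toNat = 2 * k := by omega
      rw [ht, Int.shiftRight_natCast_right]
    · have hrw : 2 * n - 2 - 2 = 2 * (n - 1) - 2 := by ring
      rw [hrw]
      have := ih (n - 1) (by omega)
      simpa [Function.comp] using this

-- ===== VERDICT (by name: the statement is the Claim_ definition above) =====
theorem decode_subfingerprint_spec : Claim_equal_decode_subfingerprint := by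
  intro bits n _
  unfold Spec_decode_subfingerprint
  rw [portA_eq, portB_eq]
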